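-- pv_equiv track=rewrite | github.com/Attila6547/ECOPY_23241 | src/weekly/weekly_test_1.py | sort_list_by_divisibility
-- ===== SOURCE A (Python) =====
-- def sort_list_by_divisibility(input_list):
--     by_two = [x for x in input_list if x % 2 == 0 and x % 5 != 0]
--     by_five = [x for x in input_list if x % 2 != 0 and x % 5 == 0]
--     by_two_and_five = [x for x in input_list if x % 2 == 0 and x % 5 == 0]
--     by_none = [x for x in input_list if x % 2 != 0 and x % 5 != 0]
--
--     result_dict = {
--         'by_two': by_two,
--         'by_five': by_five,
--         'by_two_and_five': by_two_and_five,
--         'by_none': by_none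
--     }
--
--     return result_dict
-- ===== SOURCE B (Python) =====
-- def sort_list_by_divisibility(input_list):
--     by_two, by_five, by_two_and_five, by_none = [], [], [], []
--     for x in input_list:
--         even = x % 2 == 0
--         fived = x % 5 == 0
--         if even and fived:
--             by_two_and_five.append(x)
--         elif even:
--             by_two.append(x)
--         elif fived:
--             by_five.append(x)
--         else:
--             by_none.append(x)
--     return {
--         'by_two': by_two,
--         'by_five': by_five,
--         'by_two_and_five': by_two_and_five,
--         'by_none': by_none
--     }
-- ===== Notes on version B (the rewrite author's own statement) =====
-- stated objective: faster
-- what changed: Replaces four separate comprehension passes (each testing both divisibility conditions per element) with one single pass that computes x%2 and x%5 once per element and dispatches to the matching bucket via an if/elif chain.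
import Mathlib
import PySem

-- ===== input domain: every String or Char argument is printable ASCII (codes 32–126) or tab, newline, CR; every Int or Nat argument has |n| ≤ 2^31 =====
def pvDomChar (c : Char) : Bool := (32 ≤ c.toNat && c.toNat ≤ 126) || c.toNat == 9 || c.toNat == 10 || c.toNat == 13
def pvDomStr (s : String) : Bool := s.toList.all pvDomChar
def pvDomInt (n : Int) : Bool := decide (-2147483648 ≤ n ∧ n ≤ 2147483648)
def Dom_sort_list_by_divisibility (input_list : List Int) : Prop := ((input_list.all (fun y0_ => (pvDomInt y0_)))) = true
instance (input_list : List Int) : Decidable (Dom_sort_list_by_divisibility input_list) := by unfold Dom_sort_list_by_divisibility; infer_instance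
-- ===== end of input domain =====

-- B replaces A's four separate filtering passes with one single pass that tests each
-- element once and appends it to the matching bucket (constant-factor speedup).

-- ===== PORT A =====
def sort_list_by_divisibility (input_list : List Int) : List (String × List Int) :=
  let by_two := input_list.filter (fun x => PySem.Int.mod x 2 == 0 && !(PySem.Int.mod x 5 == 0))
  let by_five := input_list.filter (fun x => !(PySem.Int.mod x 2 == 0) && PySem.Int.mod x 5 == 0)
  let by_two_and_five := input_list.filter (fun x => PySem.Int.mod x 2 == 0 && PySem.Int.mod x 5 == 0)
  let by_none := input_list.filter (fun x => !(PySem.Int.mod x 2 == 0) && !(PySem.Int.mod x 5 == 0))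
  [("by_two", by_two), ("by_five", by_five), ("by_two_and_five", by_two_and_five), ("by_none", by_none)]

-- ===== PORT B =====
def sort_list_by_divisibility_alt (input_list : List Int) : List (String × List Int) :=
  let s := input_list.foldl
    (fun (acc : List Int × List Int × List Int × List Int) x =>
      let even := PySem.Int.mod x 2 == 0
      let fived := PySem.Int.mod x 5 == 0
      if even && fived then (acc.1, acc.2.1, acc.2.2.1 ++ [x], acc.2.2.2)
      else if even then (acc.1 ++ [x], acc.2.1, acc.2.2.1, acc.2.2.2)
      else if fived then (acc.1, acc.2.1 ++ [x], acc.2.2.1, acc.2.2.2)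
      else (acc.1, acc.2.1, acc.2.2.1, acc.2.2.2 ++ [x]))
    ([], [], [], [])
  [("by_two", s.1), ("by_five", s.2.1), ("by_two_and_five", s.2.2.1), ("by_none", s.2.2.2)]

-- ===== PRECONDITION & SPEC =====
def Spec_sort_list_by_divisibility (input_list : List Int) (out : List (String × List Int)) : Prop := out = sort_list_by_divisibility_alt input_list
instance (input_list : List Int) (out : List (String × List Int)) : Decidable (Spec_sort_list_by_divisibility input_list out) := by unfold Spec_sort_list_by_divisibility; infer_instance

-- ===== CLAIM (what is proved, stated in full; the proofs are below) =====
def Claim_equal_sort_list_by_divisibility : Prop := ∀ (input_list : List Int), Dom_sort_list_by_divisibility input_list → Spec_sort_list_by_divisibility input_list (sort_list_by_divisibility input_list)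

-- ===== LEMMAS AND PROOFS =====
theorem buckets_foldl (xs : List Int) (a b c d : List Int) :
    xs.foldl
      (fun (acc : List Int × List Int × List Int × List Int) x =>
        let even := PySem.Int.mod x 2 == 0
        let fived := PySem.Int.mod x 5 == 0
        if even && fived then (acc.1, acc.2.1, acc.2.2.1 ++ [x], acc.2.2.2)
        else if even then (acc.1 ++ [x], acc.2.1, acc.2.2.1, acc.2.2.2)
        else if fived then (acc.1, acc.2.1 ++ [x], acc.2.2.1, acc.2.2.2)
        else (acc.1, acc.2.1, acc.2.2.1, acc.2.2.2 ++ [x]))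
      (a, b, c, d)
    = (a ++ xs.filter (fun x => PySem.Int.mod x 2 == 0 && !(PySem.Int.mod x 5 == 0)),
       b ++ xs.filter (fun x => !(PySem.Int.mod x 2 == 0) && PySem.Int.mod x 5 == 0),
       c ++ xs.filter (fun x => PySem.Int.mod x 2 == 0 && PySem.Int.mod x 5 == 0),
       d ++ xs.filter (fun x => !(PySem.Int.mod x 2 == 0) && !(PySem.Int.mod x 5 == 0))) := by
  induction xs generalizing a b c d with
  | nil => simp
  | cons x xs ih =>
    simp only [List.foldl_cons, List.filter_cons]
    by_cases h2 : (PySem.Int.mod x 2 == 0) = true <;>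
      by_cases h5 : (PySem.Int.mod x 5 == 0) = true <;>
        simp only [h2, h5, Bool.and_true, Bool.and_false, Bool.false_eq_true, if_true,
          if_false, ih, Bool.not_eq_true] <;>
        simp [ih, List.append_assoc, h2, h5]

-- ===== VERDICT (by name: the statement is the Claim_ definition above) =====
theorem sort_list_by_divisibility_spec : Claim_equal_sort_list_by_divisibility := by
  intro input_list _
  show _ = _
  simp only [sort_list_by_divisibility, sort_list_by_divisibility_alt]
  rw [buckets_foldl]
  simp
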